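-- pv_equiv track=rewrite | github.com/Cassius0924/WeChatter | wechatter/config/parsers/official_account_reminder_rule_list_parser.py | parse_official_account_reminder_rule_list
-- ===== SOURCE A (Python) =====
-- from typing import Dict, List
--
-- def parse_official_account_reminder_rule_list(rule_list: List) -> Dict:
--     """
--     :param rule_list: 公众号文章提醒规则列表
--     :return: 公众号文章提醒规则
--     """
--     reminder_rule = {}
--     for rule in rule_list:
--         for oa_name in rule["oa_name_list"]:
--             if oa_name not in reminder_rule:
--                 reminder_rule[oa_name] = {"to_person_list": [], "to_group_list": []}
--             reminder_rule[oa_name]["to_person_list"].extend(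
--                 rule.get("to_person_list", [])
--             )
--             reminder_rule[oa_name]["to_group_list"].extend(
--                 rule.get("to_group_list", [])
--             )
--     return reminder_rule
-- ===== SOURCE B (Python) =====
-- def parse_official_account_reminder_rule_list(rule_list):
--     """
--     :param rule_list: 公众号文章提醒规则列表
--     :return: 公众号文章提醒规则
--     """
--     # collect the distinct official-account names in first-seen order
--     seen = []
--     for rule in rule_list:
--         for name in rule["oa_name_list"]:
--             if name not in seen:
--                 seen.append(name)
--     # for each name, rescan the whole rule list and concatenate per occurrence
--     result = {}
--     for name in seen:
--         persons = []
--         groups = []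
--         for rule in rule_list:
--             for occ in rule["oa_name_list"]:
--                 if occ == name:
--                     persons = persons + rule.get("to_person_list", [])
--                     groups = groups + rule.get("to_group_list", [])
--         result[name] = {"to_person_list": persons, "to_group_list": groups}
--     return result
-- ===== Notes on version B (the rewrite author's own statement) =====
-- stated objective: alternative
-- what changed: B drops A's incrementally-mutated dict of partial results entirely: it first collects the distinct account names in first-seen order, then for each name rescans the whole rule list, concatenating recipients once per matching occurrence, so aggregation is a per-key brute-force scan instead of A's single-pass dict accumulation.
import Mathlib
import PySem

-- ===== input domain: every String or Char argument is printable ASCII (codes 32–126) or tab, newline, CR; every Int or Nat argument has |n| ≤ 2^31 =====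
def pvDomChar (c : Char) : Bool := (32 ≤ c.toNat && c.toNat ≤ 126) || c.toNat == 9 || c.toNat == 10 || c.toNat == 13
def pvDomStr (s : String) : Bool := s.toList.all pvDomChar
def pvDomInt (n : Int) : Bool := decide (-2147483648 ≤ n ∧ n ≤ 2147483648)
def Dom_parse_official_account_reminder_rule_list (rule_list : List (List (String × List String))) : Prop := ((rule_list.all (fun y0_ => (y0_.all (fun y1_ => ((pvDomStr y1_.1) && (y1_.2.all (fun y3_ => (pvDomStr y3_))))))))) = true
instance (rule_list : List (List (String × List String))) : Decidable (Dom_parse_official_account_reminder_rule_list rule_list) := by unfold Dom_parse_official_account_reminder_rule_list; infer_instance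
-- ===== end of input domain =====

-- B replaces A's single-pass dict accumulation by a per-name brute-force rescan of the rule list (first-seen names, then one full scan per name); same results, no speed claim.


-- ===== PORT A =====
-- rule.get(k, []) (and rule["oa_name_list"], which Pre_ guarantees present, so getD [] is exact there)
def ruleGetD (rule : List (String × List String)) (k : String) : List String :=
  PySem.Dict.getD (PySem.Dict.mk rule) k []

-- one iteration of A's inner loop: create the entry if absent, then extend its two lists in place
-- (Python's `reminder_rule[oa]["…"].extend(xs)` is `modify oa _ (·.modify "…" [] (· ++ xs))`; both keys are present, so the defaults are never used)
def aStep (acc : PySem.Dict String (PySem.Dict String (List String)))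
    (rule : List (String × List String)) (oa_name : String) :
    PySem.Dict String (PySem.Dict String (List String)) :=
  let acc := if acc.contains oa_name then acc else
    acc.insert oa_name (PySem.Dict.mk [("to_person_list", []), ("to_group_list", [])])
  let acc := acc.modify oa_name PySem.Dict.empty
    (fun inner => inner.modify "to_person_list" [] (· ++ ruleGetD rule "to_person_list"))
  acc.modify oa_name PySem.Dict.empty
    (fun inner => inner.modify "to_group_list" [] (· ++ ruleGetD rule "to_group_list"))

def parse_official_account_reminder_rule_list (rule_list : List (List (String × List String))) : List (String × List (String × List String)) :=
  (rule_list.foldl (fun acc rule =>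
      (ruleGetD rule "oa_name_list").foldl (fun acc oa_name => aStep acc rule oa_name) acc)
    PySem.Dict.empty).items.map (fun p => (p.1, p.2.items))

-- ===== PORT B =====
-- pass 1: the distinct names, first-seen order ('if oa_name not in seen: seen.append(oa_name)')
def bSeen (rule_list : List (List (String × List String))) : List String :=
  rule_list.foldl (fun seen rule =>
    (ruleGetD rule "oa_name_list").foldl
      (fun seen name => if seen.contains name then seen else seen ++ [name]) seen) []

-- pass 2, body: rescan the whole rule list for one name, concatenating per matching occurrence
def bCollect (rule_list : List (List (String × List String))) (name : String) :
    List String × List String :=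
  rule_list.foldl (fun pg rule =>
    (ruleGetD rule "oa_name_list").foldl
      (fun pg occ => if occ == name then
          (pg.1 ++ ruleGetD rule "to_person_list", pg.2 ++ ruleGetD rule "to_group_list")
        else pg) pg) ([], [])

def parse_official_account_reminder_rule_list_alt (rule_list : List (List (String × List String))) : List (String × List (String × List String)) :=
  ((bSeen rule_list).foldl (fun res name =>
      res.insert name (PySem.Dict.mk
        [("to_person_list", (bCollect rule_list name).1),
         ("to_group_list", (bCollect rule_list name).2)]))
    PySem.Dict.empty).items.map (fun p => (p.1, p.2.items))

-- ===== PRECONDITION & SPEC =====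
-- Pre_ excludes exactly the inputs where Python A raises KeyError: a rule without the "oa_name_list" key (B raises there too).
def Pre_parse_official_account_reminder_rule_list (rule_list : List (List (String × List String))) : Prop :=
  ∀ rule ∈ rule_list, (PySem.Dict.mk rule).contains "oa_name_list" = true
instance (rule_list : List (List (String × List String))) : Decidable (Pre_parse_official_account_reminder_rule_list rule_list) := by unfold Pre_parse_official_account_reminder_rule_list; infer_instance

def pvWitness_parse_official_account_reminder_rule_list : (List (List (String × List String))) :=
  ([[("oa_name_list", ["a", "b"]), ("to_person_list", ["p1"])],
    [("oa_name_list", ["b"]), ("to_group_list", ["g1"])]])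

def Spec_parse_official_account_reminder_rule_list (rule_list : List (List (String × List String))) (out : List (String × List (String × List String))) : Prop := out = parse_official_account_reminder_rule_list_alt rule_list
instance (rule_list : List (List (String × List String))) (out : List (String × List (String × List String))) : Decidable (Spec_parse_official_account_reminder_rule_list rule_list out) := by unfold Spec_parse_official_account_reminder_rule_list; infer_instance

-- ===== CLAIM (what is proved, stated in full; the proofs are below) =====
def Claim_equal_parse_official_account_reminder_rule_list : Prop := ∀ (rule_list : List (List (String × List String))), Dom_parse_official_account_reminder_rule_list rule_list → Pre_parse_official_account_reminder_rule_list rule_list → Spec_parse_official_account_reminder_rule_list rule_list (parse_official_account_reminder_rule_list rule_list)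

-- ===== LEMMAS AND PROOFS =====

-- ---- generic loop shape: a nested fold over rule/name pairs is a fold over the flattened occurrence stream ----
lemma foldl_flatMap_eq {α β γ : Type} (l : List α) (f : α → List β) (g : γ → β → γ) (a : γ) :
    (l.flatMap f).foldl g a = l.foldl (fun a x => (f x).foldl g a) a := by
  induction l generalizing a with
  | nil => rfl
  | cons x xs ih => simp [List.foldl_append, ih]

-- the occurrence stream: one (name, rule) pair per occurrence, in A's (and B's) visit order
def occStream (rule_list : List (List (String × List String))) :
    List (String × List (String × List String)) :=
  rule_list.flatMap (fun rule => (ruleGetD rule "oa_name_list").map (fun n => (n, rule)))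

-- ---- A's fold simulated over the rule-group index (unchanged from the dict-accumulation reading of A) ----
def innerOf (rs : List (List (String × List String))) : PySem.Dict String (List String) :=
  PySem.Dict.mk [("to_person_list", rs.flatMap (fun r => ruleGetD r "to_person_list")),
                 ("to_group_list", rs.flatMap (fun r => ruleGetD r "to_group_list"))]

def entryOf (p : String × List (List (String × List String))) :
    String × PySem.Dict String (List String) := (p.1, innerOf p.2)

lemma contains_map_entry (l : List (String × List (List (String × List String)))) (oa : String) :
    (PySem.Dict.mk (l.map entryOf)).contains oa = (PySem.Dict.mk l).contains oa := by
  simp only [PySem.Dict.contains, List.any_map]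
  exact PySem.List.any_congr_mem (fun x _ => rfl)

lemma get?_map_entry (l : List (String × List (List (String × List String)))) (oa : String) :
    (PySem.Dict.mk (l.map entryOf)).get? oa = ((PySem.Dict.mk l).get? oa).map innerOf := by
  simp only [PySem.Dict.get?, List.find?_map, Option.map_map]
  rfl

lemma insert_map_entry (l : List (String × List (List (String × List String)))) (oa : String)
    (v : List (List (String × List String))) :
    (PySem.Dict.mk (l.map entryOf)).insert oa (innerOf v)
      = PySem.Dict.mk (((PySem.Dict.mk l).insert oa v).items.map entryOf) := by
  simp only [PySem.Dict.insert, contains_map_entry]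
  by_cases hc : (PySem.Dict.mk l).contains oa = true
  · simp only [hc, if_true, List.map_map]
    congr 1
    apply List.map_congr_left
    intro p _
    by_cases hp : p.1 = oa <;> simp [hp, entryOf]
  · simp [hc, entryOf]

-- A's in-place double extend on the two-key inner dict, computed out
lemma modify_person (P G w : List String) :
    (PySem.Dict.mk [("to_person_list", P), ("to_group_list", G)]).modify "to_person_list" [] (· ++ w)
      = PySem.Dict.mk [("to_person_list", P ++ w), ("to_group_list", G)] := rfl

lemma modify_group (P G w : List String) :
    (PySem.Dict.mk [("to_person_list", P), ("to_group_list", G)]).modify "to_group_list" [] (· ++ w)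
      = PySem.Dict.mk [("to_person_list", P), ("to_group_list", G ++ w)] := rfl

lemma extend_inner (rs : List (List (String × List String))) (rule : List (String × List String)) :
    ((innerOf rs).modify "to_person_list" [] (· ++ ruleGetD rule "to_person_list")).modify
        "to_group_list" [] (· ++ ruleGetD rule "to_group_list") = innerOf (rs ++ [rule]) := by
  simp only [innerOf]
  rw [modify_person, modify_group]
  simp [List.flatMap_append]

lemma aStep_map_entry (l : List (String × List (List (String × List String))))
    (rule : List (String × List String)) (oa : String) :
    aStep (PySem.Dict.mk (l.map entryOf)) rule oa
      = PySem.Dict.mk (((PySem.Dict.mk l).modify oa [] (· ++ [rule])).items.map entryOf) := by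
  have hmod : (PySem.Dict.mk l).modify oa [] (· ++ [rule])
      = (PySem.Dict.mk l).insert oa ((PySem.Dict.mk l).getD oa [] ++ [rule]) := rfl
  rw [hmod]
  unfold aStep
  simp only [contains_map_entry]
  by_cases hc : (PySem.Dict.mk l).contains oa = true
  · -- entry already present: the two modifies collapse onto one insert
    have hrs : ∃ rs, (PySem.Dict.mk l).get? oa = some rs := by
      rcases h : (PySem.Dict.mk l).get? oa with _ | rs
      · rw [PySem.Dict.contains_eq_isSome_get?, h] at hc; simp at hc
      · exact ⟨rs, rfl⟩
    rcases hrs with ⟨rs, hrs⟩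
    simp only [hc, if_true, PySem.Dict.modify, PySem.Dict.getD_eq_get?_getD, get?_map_entry,
      hrs, PySem.Dict.get?_insert_self, Option.map_some, Option.getD_some,
      PySem.Dict.insert_insert_self]
    rw [show ∀ w, ((innerOf rs).get? "to_person_list").getD [] ++ w
          = ((innerOf rs).getD "to_person_list" []) ++ w from fun _ => rfl,
        show ∀ w, (innerOf rs).insert "to_person_list" ((innerOf rs).getD "to_person_list" [] ++ w)
          = (innerOf rs).modify "to_person_list" [] (· ++ w) from fun _ => rfl]
    rw [show ∀ w, ((innerOf rs).modify "to_person_list" [] (· ++ ruleGetD rule "to_person_list")).insert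
            "to_group_list"
            ((((innerOf rs).modify "to_person_list" [] (· ++ ruleGetD rule "to_person_list")).get?
                "to_group_list").getD [] ++ w)
          = ((innerOf rs).modify "to_person_list" [] (· ++ ruleGetD rule "to_person_list")).modify
              "to_group_list" [] (· ++ w) from fun _ => rfl]
    rw [extend_inner]
    exact insert_map_entry l oa (rs ++ [rule])
  · -- fresh name: A inserts the empty template (= innerOf []) and fills it
    have hc' : (PySem.Dict.mk l).contains oa = false := by
      simp only [Bool.not_eq_true] at hc; exact hc
    have hg : (PySem.Dict.mk l).get? oa = none := by
      rw [PySem.Dict.contains_eq_isSome_get?] at hc'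
      rcases h : (PySem.Dict.mk l).get? oa with _ | rs
      · rfl
      · rw [h] at hc'; simp at hc'
    have h0 : PySem.Dict.mk (κ := String) [("to_person_list", ([] : List String)), ("to_group_list", ([] : List String))] = innerOf [] := rfl
    simp only [hc', Bool.false_eq_true, if_false, h0, PySem.Dict.modify,
      PySem.Dict.getD_eq_get?_getD, PySem.Dict.get?_insert_self, Option.getD_some,
      PySem.Dict.insert_insert_self, hg, Option.getD_none, List.nil_append]
    rw [show ∀ w, (innerOf []).insert "to_person_list" (((innerOf []).get? "to_person_list").getD [] ++ w)
          = (innerOf []).modify "to_person_list" [] (· ++ w) from fun _ => rfl]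
    rw [show ∀ w, ((innerOf []).modify "to_person_list" [] (· ++ ruleGetD rule "to_person_list")).insert
            "to_group_list"
            ((((innerOf []).modify "to_person_list" [] (· ++ ruleGetD rule "to_person_list")).get?
                "to_group_list").getD [] ++ w)
          = ((innerOf []).modify "to_person_list" [] (· ++ ruleGetD rule "to_person_list")).modify
              "to_group_list" [] (· ++ w) from fun _ => rfl]
    rw [extend_inner]
    simp only [List.nil_append]
    exact insert_map_entry l oa [rule]

lemma occ_fold_map_entry (S : List (String × List (String × List String))) :
    ∀ l : List (String × List (List (String × List String))),
    S.foldl (fun acc p => aStep acc p.2 p.1) (PySem.Dict.mk (l.map entryOf))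
      = PySem.Dict.mk ((S.foldl (fun idx p => idx.modify p.1 [] (· ++ [p.2])) (PySem.Dict.mk l)).items.map entryOf) := by
  induction S with
  | nil => intro l; rfl
  | cons p rest ih =>
    intro l
    simp only [List.foldl_cons, aStep_map_entry]
    exact ih _

-- A's nested fold, written over the occurrence stream
lemma a_fold_eq_occ_fold (rule_list : List (List (String × List String)))
    (d : PySem.Dict String (PySem.Dict String (List String))) :
    rule_list.foldl (fun acc rule =>
        (ruleGetD rule "oa_name_list").foldl (fun acc oa_name => aStep acc rule oa_name) acc) d
      = (occStream rule_list).foldl (fun acc p => aStep acc p.2 p.1) d := by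
  rw [occStream, foldl_flatMap_eq]
  simp only [List.foldl_map]

-- ---- characterisation of the index fold, by the PySem dict-loop lemmas ----
def idxFold (S : List (String × List (String × List String))) :
    PySem.Dict String (List (List (String × List String))) :=
  S.foldl (fun idx p => idx.modify p.1 [] (· ++ [p.2])) PySem.Dict.empty

lemma idxFold_keys (S : List (String × List (String × List String))) :
    (idxFold S).keys = PySem.Set.ofList (S.map (·.1)) := by
  rw [idxFold, PySem.Dict.keys_foldl_modify_key S Prod.fst [] (fun _ p => (· ++ [p.2])) PySem.Dict.empty]
  simp [PySem.Dict.keys_empty, PySem.Set.update_nil_left]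

lemma idxFold_nodup (S : List (String × List (String × List String))) :
    (idxFold S).keys.Nodup := by
  exact PySem.Dict.nodup_keys_foldl_modify_key S Prod.fst [] (fun _ p => (· ++ [p.2]))
    PySem.Dict.empty (by simp [PySem.Dict.keys_empty])

lemma idxFold_getD (S : List (String × List (String × List String))) (n : String) :
    (idxFold S).getD n [] = (S.filter (fun p => p.1 == n)).map (·.2) := by
  rw [idxFold, PySem.Dict.getD_foldl_modify_append]
  simp [PySem.Dict.getD_empty]

lemma idxFold_items (S : List (String × List (String × List String))) :
    (idxFold S).items = (PySem.Set.ofList (S.map (·.1))).map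
      (fun n => (n, (S.filter (fun p => p.1 == n)).map (·.2))) := by
  rw [PySem.Dict.items_eq_map_keys (idxFold S) (idxFold_nodup S) [], idxFold_keys]
  exact List.map_congr_left (fun n _ => by rw [idxFold_getD])

-- ---- B pass 1 equals the first-seen names of the occurrence stream ----
lemma seen_update (rule_list : List (List (String × List String))) :
    ∀ seen : List String,
    rule_list.foldl (fun s rule => PySem.Set.update s (ruleGetD rule "oa_name_list")) seen
      = PySem.Set.update seen (rule_list.flatMap (fun rule => ruleGetD rule "oa_name_list")) := by
  induction rule_list with
  | nil => intro seen; simp [PySem.Set.update_nil]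
  | cons r rs ih =>
    intro seen
    rw [List.foldl_cons, ih, List.flatMap_cons, PySem.Set.update_append]

lemma occ_fst (rule_list : List (List (String × List String))) :
    (occStream rule_list).map (·.1) = rule_list.flatMap (fun rule => ruleGetD rule "oa_name_list") := by
  simp [occStream, List.map_flatMap, List.map_map, Function.comp_def]

lemma bSeen_eq (rule_list : List (List (String × List String))) :
    bSeen rule_list = PySem.Set.ofList ((occStream rule_list).map (·.1)) := by
  rw [occ_fst,
    show bSeen rule_list
        = rule_list.foldl (fun s rule => PySem.Set.update s (ruleGetD rule "oa_name_list")) [] from rfl,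
    seen_update, PySem.Set.update_nil_left]

-- ---- B pass 2 equals the concatenations over the filtered occurrence stream ----
lemma bCollect_occ (S : List (String × List (String × List String))) (name : String) :
    ∀ ab : List String × List String,
    S.foldl (fun pg p => if p.1 == name then
        (pg.1 ++ ruleGetD p.2 "to_person_list", pg.2 ++ ruleGetD p.2 "to_group_list") else pg) ab
      = (ab.1 ++ ((S.filter (fun p => p.1 == name)).map (·.2)).flatMap (fun r => ruleGetD r "to_person_list"),
         ab.2 ++ ((S.filter (fun p => p.1 == name)).map (·.2)).flatMap (fun r => ruleGetD r "to_group_list")) := by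
  induction S with
  | nil => intro ab; simp
  | cons p rest ih =>
    intro ab
    by_cases hp : p.1 == name
    · simp only [List.foldl_cons, hp, if_true, ih, List.filter_cons, List.map_cons,
        List.flatMap_cons]
      simp [List.append_assoc]
    · rw [List.foldl_cons, if_neg hp, List.filter_cons_of_neg (by simpa using hp)]
      exact ih ab

lemma bCollect_eq (rule_list : List (List (String × List String))) (name : String) :
    bCollect rule_list name
      = ((((occStream rule_list).filter (fun p => p.1 == name)).map (·.2)).flatMap (fun r => ruleGetD r "to_person_list"),
         (((occStream rule_list).filter (fun p => p.1 == name)).map (·.2)).flatMap (fun r => ruleGetD r "to_group_list")) := by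
  have hflat : bCollect rule_list name
      = (occStream rule_list).foldl (fun pg p => if p.1 == name then
          (pg.1 ++ ruleGetD p.2 "to_person_list", pg.2 ++ ruleGetD p.2 "to_group_list") else pg)
        ([], []) := by
    rw [bCollect, occStream, foldl_flatMap_eq]
    simp only [List.foldl_map]
  rw [hflat, bCollect_occ]
  simp

-- ---- B's result dict: distinct fresh keys just append ----
lemma b_result_items (rule_list : List (List (String × List String))) :
    ((bSeen rule_list).foldl (fun res name =>
        res.insert name (PySem.Dict.mk
          [("to_person_list", (bCollect rule_list name).1),
           ("to_group_list", (bCollect rule_list name).2)]))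
      PySem.Dict.empty).items
    = (bSeen rule_list).map (fun name => (name, PySem.Dict.mk
          [("to_person_list", (bCollect rule_list name).1),
           ("to_group_list", (bCollect rule_list name).2)])) := by
  rw [PySem.Dict.items_foldl_insert_fresh (k := fun n => n)
      (v := fun name => PySem.Dict.mk
          [("to_person_list", (bCollect rule_list name).1),
           ("to_group_list", (bCollect rule_list name).2)])
      (d := PySem.Dict.empty) (l := bSeen rule_list)
      (by intro a _; exact PySem.Dict.contains_empty a)
      (by rw [List.map_id_fun']; rw [bSeen_eq]; exact PySem.Set.nodup_ofList _)]
  simp [PySem.Dict.empty]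

-- ===== VERDICT (by name: the statement is the Claim_ definition above) =====
theorem parse_official_account_reminder_rule_list_spec : Claim_equal_parse_official_account_reminder_rule_list := by
  intro rule_list _ _
  unfold Spec_parse_official_account_reminder_rule_list
  unfold parse_official_account_reminder_rule_list parse_official_account_reminder_rule_list_alt
  rw [a_fold_eq_occ_fold, b_result_items, bSeen_eq]
  rw [show (PySem.Dict.empty : PySem.Dict String (PySem.Dict String (List String)))
        = PySem.Dict.mk (([] : List (String × List (List (String × List String)))).map entryOf) from rfl,
      occ_fold_map_entry]
  rw [show PySem.Dict.mk (([] : List (String × List (List (String × List String)))))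
        = (PySem.Dict.empty : PySem.Dict String (List (List (String × List String)))) from rfl]
  rw [show (occStream rule_list).foldl (fun idx p => idx.modify p.1 [] (· ++ [p.2])) PySem.Dict.empty
        = idxFold (occStream rule_list) from rfl]
  rw [show (PySem.Dict.mk ((idxFold (occStream rule_list)).items.map entryOf)).items
        = (idxFold (occStream rule_list)).items.map entryOf from rfl]
  rw [idxFold_items]
  simp only [List.map_map]
  apply List.map_congr_left
  intro n _
  simp only [Function.comp, entryOf, innerOf, bCollect_eq]
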